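-- pv_equiv track=rewrite | github.com/Nikhil-Yadav-73/vidocr | vtr.py | correct_text
-- ===== SOURCE A (Python) =====
-- def correct_text(text):
--     corrected_text = []
--     for i, char in enumerate(text):
--         if i < 2 or (4 <= i < 6):
--             if not char.isalpha():
--                 char = 'A'
--         elif (2 <= i < 4) or (6 <= i):
--             if not char.isdigit():
--                 char = '0'
--         corrected_text.append(char)
--     return ''.join(corrected_text)
-- ===== SOURCE B (Python) =====
-- def correct_text(text):
--     # Two staged whole-string passes (a fully "letterized" and a fully "digitized"
--     # copy), then a per-position selection by a precomputed boolean mask.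
--     letters = [c if c.isalpha() else 'A' for c in text]
--     digits = [c if c.isdigit() else '0' for c in text]
--     mask = [True, True, False, False, True, True] + [False] * (len(text) - 6)
--     return ''.join(l if m else d for m, l, d in zip(mask, letters, digits))
-- ===== Notes on version B (the rewrite author's own statement) =====
-- stated objective: alternative
-- what changed: Replaces the single indexed scan branching on each character's global position with two staged whole-string passes (a letterized copy and a digitized copy) merged per position by zipping with a precomputed boolean mask; no index arithmetic or per-character branching on position remains.
import Mathlib
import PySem

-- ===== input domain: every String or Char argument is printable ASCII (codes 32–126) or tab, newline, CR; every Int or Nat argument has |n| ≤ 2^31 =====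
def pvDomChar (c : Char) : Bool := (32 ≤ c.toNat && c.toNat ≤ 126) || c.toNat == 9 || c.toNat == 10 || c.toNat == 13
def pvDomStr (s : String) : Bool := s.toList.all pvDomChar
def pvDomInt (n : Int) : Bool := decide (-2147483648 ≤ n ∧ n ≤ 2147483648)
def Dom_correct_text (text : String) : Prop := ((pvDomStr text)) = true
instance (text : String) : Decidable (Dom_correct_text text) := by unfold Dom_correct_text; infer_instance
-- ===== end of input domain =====

-- B is an alternative decomposition: two staged whole-string passes (letterized and
-- digitized copies) merged per position by a precomputed boolean mask, instead of
-- A's single scan branching on each character's global index.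

-- ===== PORT A =====
-- the per-character correction A applies at index i (the branch structure of A's loop body)
def ctRule (i : Int) (ch : Char) : Char :=
  if i < 2 ∨ (4 ≤ i ∧ i < 6) then
    (if ¬ PySem.Chars.isalpha ch then 'A' else ch)
  else if (2 ≤ i ∧ i < 4) ∨ 6 ≤ i then
    (if ¬ PySem.Chars.isdigit ch then '0' else ch)
  else ch

def ctStep (acc : List Char) (p : Int × Char) : List Char := acc ++ [ctRule p.1 p.2]

def correct_text (text : String) : String :=
  String.mk ((PySem.List.enumerate text.toList 0).foldl ctStep [])

-- ===== PORT B =====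
def correct_text_alt (text : String) : String :=
  let cs := text.toList
  let letters := cs.map (fun c => if PySem.Chars.isalpha c then c else 'A')
  let digits := cs.map (fun c => if PySem.Chars.isdigit c then c else '0')
  let mask := [true, true, false, false, true, true] ++ List.replicate (cs.length - 6) false
  String.mk ((mask.zip (letters.zip digits)).map (fun t => if t.1 then t.2.1 else t.2.2))

-- ===== PRECONDITION & SPEC =====
def Spec_correct_text (text : String) (out : String) : Prop := out = correct_text_alt text
instance (text : String) (out : String) : Decidable (Spec_correct_text text out) := by unfold Spec_correct_text; infer_instance

-- ===== CLAIM (what is proved, stated in full; the proofs are below) =====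
def Claim_equal_correct_text : Prop := ∀ (text : String), Dom_correct_text text → Spec_correct_text text (correct_text text)

-- ===== LEMMAS AND PROOFS =====

theorem ctFoldl (l : List (Int × Char)) (acc : List Char) :
    l.foldl ctStep acc = acc ++ l.map (fun p => ctRule p.1 p.2) := by
  induction l generalizing acc with
  | nil => simp
  | cons p l ih => simp [ctStep, ih]

theorem ctSwap {α : Type} (b : Bool) (x y : α) :
    (if ¬ b then x else y) = (if b then y else x) := by cases b <;> simp

theorem ctSwap' {α : Type} (b : Bool) (x y : α) :
    (if b = false then x else y) = (if b then y else x) := by cases b <;> simp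

theorem ctTail (rest : List Char) (s : Int) (hs : 6 ≤ s) :
    (PySem.List.enumerate rest s).map (fun p => ctRule p.1 p.2)
      = rest.map (fun c => if PySem.Chars.isdigit c then c else '0') := by
  induction rest generalizing s with
  | nil => simp
  | cons c rest ih =>
    have h1 : ¬(s < 2 ∨ (4 ≤ s ∧ s < 6)) := by omega
    have h2 : (2 ≤ s ∧ s < 4) ∨ 6 ≤ s := by omega
    rw [PySem.List.enumerate_cons, List.map_cons, List.map_cons, ih (s + 1) (by omega)]
    rw [show ctRule (s, c).1 (s, c).2 = if PySem.Chars.isdigit c then c else '0' by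
      rw [ctRule, if_neg h1, if_pos h2, ctSwap]]

-- zipping an all-false mask with the two staged copies selects the digitized copy
theorem ctZipFalse (rest : List Char) :
    ((List.replicate rest.length false).zip
        ((rest.map (fun c => if PySem.Chars.isalpha c then c else 'A')).zip
         (rest.map (fun c => if PySem.Chars.isdigit c then c else '0')))).map
      (fun t => if t.1 then t.2.1 else t.2.2)
      = rest.map (fun c => if PySem.Chars.isdigit c then c else '0') := by
  induction rest with
  | nil => simp
  | cons c rest ih => simp [List.replicate_succ, ih]

theorem correct_text_spec : Claim_equal_correct_text := by
  intro text _
  unfold Spec_correct_text correct_text correct_text_alt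
  rw [ctFoldl]
  rcases text.toList with _ | ⟨a, _ | ⟨b, _ | ⟨c, _ | ⟨d, _ | ⟨e, _ | ⟨f, rest⟩⟩⟩⟩⟩⟩ <;>
  · try simp only [PySem.List.enumerate_cons, List.map_cons]
    try rw [show (0:Int)+1+1+1+1+1+1 = 6 by norm_num, ctTail rest 6 (by norm_num)]
    simp [ctRule, ctSwap', ctZipFalse]
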